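-- pv_equiv track=rewrite | github.com/Renopop/RAG_v7_PERSO | processing/confluence_processing.py | group_pages_by_section
-- ===== SOURCE A (Python) =====
-- from typing import List, Dict, Any, Optional, Callable
--
-- def group_pages_by_section(pages: List[Dict[str, Any]]) -> Dict[str, List[Dict[str, Any]]]:
--     """
--     Groupe les pages par leur page parente de niveau 2.
--     Ignore les pages de niveau 1 et 2, ne garde que niveau 3+.
--
--     Args:
--         pages: Liste de pages avec le champ 'path' (format: "Racine > Section > Page")
--
--     Returns:
--         Dict avec clé = nom de la section (niveau 2), valeur = liste de sous-pages
--     """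
--     sections = {}
--
--     for page in pages:
--         path = page.get("path", "")
--         parts = [p.strip() for p in path.split(">") if p.strip()]
--
--         # Ne garder que les pages de niveau 3+ (au moins 3 éléments dans le chemin)
--         # parts[0] = racine (ignoré)
--         # parts[1] = section/collection (nom du groupe)
--         # parts[2+] = sous-pages (contenu)
--         if len(parts) >= 3:
--             # Utiliser le niveau 2 (index 1) comme nom de section
--             section_name = parts[1]
--
--             if section_name not in sections:
--                 sections[section_name] = []
--             sections[section_name].append(page)
--
--     # Trier les sections par nom
--     return dict(sorted(sections.items()))
-- ===== SOURCE B (Python) =====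
-- from typing import List, Dict, Any
--
--
-- def _section_name(page: Dict[str, Any]):
--     parts = [p.strip() for p in page.get("path", "").split(">") if p.strip()]
--     return parts[1] if len(parts) >= 3 else None
--
--
-- def group_pages_by_section(pages: List[Dict[str, Any]]) -> Dict[str, List[Dict[str, Any]]]:
--     # Sort-then-scan: pair each level-3+ page with its section name, stable-sort
--     # the pairs by section name, then group adjacent equal names in one pass.
--     keyed = []
--     for page in pages:
--         name = _section_name(page)
--         if name is not None:
--             keyed.append((name, page))
--     keyed.sort(key=lambda t: t[0])
--
--     result = {}
--     i = 0
--     n = len(keyed)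
--     while i < n:
--         j = i
--         while j < n and keyed[j][0] == keyed[i][0]:
--             j += 1
--         result[keyed[i][0]] = [pg for _, pg in keyed[i:j]]
--         i = j
--     return result
-- ===== Notes on version B (the rewrite author's own statement) =====
-- stated objective: alternative
-- what changed: Replaces A's group-into-dict-then-sort-keys with pairing each level-3+ page with its section name, stable-sorting the pairs by name, and grouping adjacent equal names in a single two-pointer scan.
import Mathlib
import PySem

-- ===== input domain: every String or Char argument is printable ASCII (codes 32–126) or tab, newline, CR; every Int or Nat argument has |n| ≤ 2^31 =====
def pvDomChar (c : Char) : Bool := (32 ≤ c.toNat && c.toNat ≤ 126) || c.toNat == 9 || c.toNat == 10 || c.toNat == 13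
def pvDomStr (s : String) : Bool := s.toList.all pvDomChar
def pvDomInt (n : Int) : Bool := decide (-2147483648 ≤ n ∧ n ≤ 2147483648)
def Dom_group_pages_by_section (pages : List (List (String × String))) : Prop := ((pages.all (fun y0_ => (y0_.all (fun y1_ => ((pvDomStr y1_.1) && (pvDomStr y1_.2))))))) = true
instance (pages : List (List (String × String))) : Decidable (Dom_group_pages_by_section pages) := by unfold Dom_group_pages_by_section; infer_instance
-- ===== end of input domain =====

-- ===== PORT A =====
-- B changes the algorithm only: group-into-dict-then-sort-keys becomes sort-pairs-then-scan; same return value.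

-- shared per-page step, written exactly as Python's
-- parts = [p.strip() for p in page.get("path", "").split(">") if p.strip()]
def pageParts (page : List (String × String)) : List String :=
  let path := (PySem.Dict.mk page).getD "path" ""
  (((PySem.Str.split? path ">").getD []).filter
      (fun p => !(PySem.Str.strip p == ""))).map PySem.Str.strip

-- port of A: one dict-building loop over pages, then sorted(items)
def group_pages_by_section (pages : List (List (String × String))) :
    List (String × List (List (String × String))) :=
  let sections := pages.foldl
    (fun d page =>
      let parts := pageParts page
      if parts.length ≥ 3 then
        let sectionName := PySem.List.pyGetD parts 1 ""
        -- if section_name not in sections: sections[section_name] = []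
        let d' := if d.contains sectionName then d else d.insert sectionName []
        -- sections[section_name].append(page)
        d'.insert sectionName (d'.getD sectionName [] ++ [page])
      else d)
    PySem.Dict.empty
  PySem.List.sorted sections.items (fun p => p.1)

-- ===== PORT B =====
-- inner while loop of Source B: j advances over the run of equal leading names (takeWhile/dropWhile),
-- the outer while loop is the recursion on the remaining suffix
def groupAdj {β : Type} : List (String × β) → List (String × List β)
  | [] => []
  | (k, pg) :: rest =>
    let same := rest.takeWhile (fun t => t.1 == k)
    let restr := rest.dropWhile (fun t => t.1 == k)
    (k, pg :: same.map (fun t => t.2)) :: groupAdj restr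
termination_by l => l.length
decreasing_by
  simp only [List.length_cons]
  exact Nat.lt_succ_of_le (List.length_dropWhile_le _ _)

-- port of B: collect (name, page) pairs, stable-sort by name, group adjacent runs
def group_pages_by_section_alt (pages : List (List (String × String))) :
    List (String × List (List (String × String))) :=
  let keyed := pages.foldl
    (fun acc page =>
      let parts := pageParts page
      if parts.length ≥ 3 then acc ++ [(PySem.List.pyGetD parts 1 "", page)] else acc)
    []
  groupAdj (PySem.List.sorted keyed (fun t => t.1))

-- ===== PRECONDITION & SPEC =====
def Spec_group_pages_by_section (pages : List (List (String × String))) (out : List (String × List (List (String × String)))) : Prop := out = group_pages_by_section_alt pages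
instance (pages : List (List (String × String))) (out : List (String × List (List (String × String)))) : Decidable (Spec_group_pages_by_section pages out) := by unfold Spec_group_pages_by_section; infer_instance

-- ===== CLAIM (what is proved, stated in full; the proofs are below) =====
def Claim_equal_group_pages_by_section : Prop := ∀ (pages : List (List (String × String))), Dom_group_pages_by_section pages → Spec_group_pages_by_section pages (group_pages_by_section pages)

-- ===== LEMMAS AND PROOFS =====

-- the filtered (name, page) stream both programs are built from
def keyedOf (pages : List (List (String × String))) : List (String × List (String × String)) :=
  pages.filterMap (fun page =>
    let parts := pageParts page
    if parts.length ≥ 3 then some (PySem.List.pyGetD parts 1 "", page) else none)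

-- A's loop body is Dict.modify
lemma step_eq_modify (d : PySem.Dict String (List (List (String × String))))
    (s : String) (page : List (String × String)) :
    (let d' := if d.contains s then d else d.insert s []
     d'.insert s (d'.getD s [] ++ [page])) = d.modify s [] (fun v => v ++ [page]) := by
  by_cases h : d.contains s
  · simp [PySem.Dict.modify, h]
  · have h' : d.contains s = false := by simpa using h
    simp [PySem.Dict.modify, h, PySem.Dict.insert_insert_self,
      PySem.Dict.getD_insert_self, PySem.Dict.getD_of_not_contains _ _ h']

-- A's fold over pages = modify-fold over keyedOf pages
lemma foldA_eq (pages : List (List (String × String))) (d : PySem.Dict String (List (List (String × String)))) :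
    pages.foldl
      (fun d page =>
        let parts := pageParts page
        if parts.length ≥ 3 then
          let sectionName := PySem.List.pyGetD parts 1 ""
          let d' := if d.contains sectionName then d else d.insert sectionName []
          d'.insert sectionName (d'.getD sectionName [] ++ [page])
        else d) d
    = (keyedOf pages).foldl (fun d p => d.modify p.1 [] (fun v => v ++ [p.2])) d := by
  induction pages generalizing d with
  | nil => rfl
  | cons page rest ih =>
    simp only [keyedOf, List.filterMap_cons, List.foldl_cons]
    by_cases h : (pageParts page).length ≥ 3
    · simp only [h, if_pos]
      rw [step_eq_modify]
      simpa [keyedOf] using ih _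
    · simp only [h, if_neg, not_false_iff]
      simpa [keyedOf] using ih d

-- B's fold over pages = keyedOf
lemma foldB_eq (pages : List (List (String × String))) (acc : List (String × List (String × String))) :
    pages.foldl (fun acc page =>
      let parts := pageParts page
      if parts.length ≥ 3 then acc ++ [(PySem.List.pyGetD parts 1 "", page)] else acc) acc
    = acc ++ keyedOf pages := by
  induction pages generalizing acc with
  | nil => simp [keyedOf]
  | cons page rest ih =>
    simp only [keyedOf, List.filterMap_cons, List.foldl_cons]
    by_cases h : (pageParts page).length ≥ 3
    · simp only [h, if_pos]
      rw [ih]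
      simp [keyedOf]
    · simp only [h, if_neg, not_false_iff]
      rw [ih]
      simp [keyedOf]

-- stability of PySem's sort: the subsequence of a fixed key is unchanged
lemma insertBy_pairwise {β : Type} (key : String × β → String) (x : String × β) :
    ∀ acc : List (String × β), acc.Pairwise (fun a b => key a ≤ key b) →
    (PySem.List.insertBy (fun a b => decide (key a < key b)) x acc).Pairwise (fun a b => key a ≤ key b) := by
  intro acc
  induction acc with
  | nil => intro _; simp [PySem.List.insertBy]
  | cons y ys ih =>
    intro h
    rw [List.pairwise_cons] at h
    by_cases hb : key x < key y
    · simp only [PySem.List.insertBy, hb, decide_true, if_true]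
      refine List.pairwise_cons.mpr ⟨?_, List.pairwise_cons.mpr h⟩
      intro a ha
      rcases List.mem_cons.mp ha with rfl | ha
      · exact le_of_lt hb
      · exact le_trans (le_of_lt hb) (h.1 a ha)
    · simp only [PySem.List.insertBy, hb, decide_false]
      refine List.pairwise_cons.mpr ⟨?_, ih h.2⟩
      intro a ha
      have : a = x ∨ a ∈ ys := by
        have := (PySem.List.mem_insertBy (before := fun a b => decide (key a < key b)) (x := x) (ys := ys) (y := a)).mp ha
        exact this
      rcases this with rfl | ha'
      · exact le_of_not_gt hb
      · exact h.1 a ha'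

lemma insertBy_filter {β : Type} (x : String × β) (c : String)
    (acc : List (String × β)) (h : acc.Pairwise (fun a b => a.1 ≤ b.1)) :
    (PySem.List.insertBy (fun a b => decide (a.1 < b.1)) x acc).filter (fun p => p.1 == c)
    = if x.1 == c then acc.filter (fun p => p.1 == c) ++ [x] else acc.filter (fun p => p.1 == c) := by
  induction acc with
  | nil => simp only [PySem.List.insertBy, List.filter_cons]; split <;> simp_all
  | cons y ys ih =>
    rw [List.pairwise_cons] at h
    by_cases hb : x.1 < y.1
    · simp only [PySem.List.insertBy, hb, decide_true, if_true]
      by_cases hc : x.1 == c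
      · -- x.1 = c; then no element of y::ys has key c ≤ ... wait y could have key c? y.1 > x.1 = c so no
        have hxc : x.1 = c := by simpa using hc
        have : ∀ a ∈ y :: ys, ¬ (a.1 == c) := by
          intro a ha
          have : y.1 ≤ a.1 := by
            rcases List.mem_cons.mp ha with rfl | ha'
            · exact le_refl _
            · exact h.1 a ha'
          have : c < a.1 := lt_of_lt_of_le (hxc ▸ hb) this
          simp [ne_of_gt this]
        rw [List.filter_cons_of_pos (by simpa using hc), if_pos hc]
        rw [List.filter_eq_nil_iff.mpr ?_]
        · simp
        · intro a ha; exact this a ha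
      · simp [List.filter_cons, hc]
    · simp only [PySem.List.insertBy, hb, decide_false]
      rw [if_neg (by simp), List.filter_cons, ih h.2]
      by_cases hc : x.1 == c <;> by_cases hyc : y.1 == c <;> simp [hc, hyc]

lemma foldl_insertBy_filter {β : Type} (c : String) :
    ∀ (xs : List (String × β)) (acc : List (String × β)), acc.Pairwise (fun a b => a.1 ≤ b.1) →
    ((xs.foldl (fun acc x => PySem.List.insertBy (fun a b => decide (a.1 < b.1)) x acc) acc).filter (fun p => p.1 == c))
    = acc.filter (fun p => p.1 == c) ++ xs.filter (fun p => p.1 == c) := by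
  intro xs
  induction xs with
  | nil => intro acc h; simp
  | cons x rest ih =>
    intro acc h
    simp only [List.foldl_cons]
    rw [ih _ (insertBy_pairwise (fun p => p.1) x acc h), insertBy_filter x c acc h]
    rw [List.filter_cons]
    by_cases hc : x.1 == c <;> simp [hc]

lemma sorted_filter_stable {β : Type} (xs : List (String × β)) (c : String) :
    (PySem.List.sorted xs (fun t => t.1)).filter (fun p => p.1 == c)
    = xs.filter (fun p => p.1 == c) := by
  rw [PySem.List.sorted_eq_foldl_insertBy, foldl_insertBy_filter c xs [] (by simp)]
  simp

-- facts about dropWhile tail under pairwise ≤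
lemma restr_gt {β : Type} (k : String) (pg : β) (rest : List (String × β))
    (h : ((k, pg) :: rest).Pairwise (fun a b => a.1 ≤ b.1)) :
    ∀ a ∈ rest.dropWhile (fun t => t.1 == k), k < a.1 := by
  have hsub : ∀ a ∈ rest.dropWhile (fun t => t.1 == k), a ∈ rest := fun a ha =>
    (List.dropWhile_sublist _).mem ha
  have hge : ∀ a ∈ rest, k ≤ a.1 := by
    rw [List.pairwise_cons] at h
    exact fun a ha => h.1 a ha
  have hp : (rest.dropWhile (fun t => t.1 == k)).Pairwise (fun a b => a.1 ≤ b.1) :=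
    (List.pairwise_cons.mp h).2.sublist (List.dropWhile_sublist _)
  cases hr : rest.dropWhile (fun t => t.1 == k) with
  | nil => simp
  | cons b bs =>
    have hbk : ¬ (b.1 == k) := by
      have := List.head?_dropWhile_not (fun t => t.1 == k) rest
      rw [hr] at this; simpa using this
    have hbk' : b.1 ≠ k := by simpa using hbk
    have hbgt : k < b.1 := lt_of_le_of_ne (hge b (hsub b (hr ▸ List.mem_cons_self))) (Ne.symm hbk')
    intro a ha
    rcases List.mem_cons.mp ha with rfl | ha'
    · exact hbgt
    · have : b.1 ≤ a.1 := by
        rw [hr] at hp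
        exact (List.pairwise_cons.mp hp).1 a ha'
      exact lt_of_lt_of_le hbgt this

lemma mem_keys_groupAdj {β : Type} :
    ∀ (l : List (String × β)), l.Pairwise (fun a b => a.1 ≤ b.1) →
    ∀ k, k ∈ (groupAdj l).map (fun p => p.1) ↔ k ∈ l.map (fun p => p.1) := by
  intro l
  induction l using groupAdj.induct with
  | case1 => simp [groupAdj]
  | case2 k pg rest restr ih =>
    intro h c
    have hsame : ∀ a ∈ rest.takeWhile (fun t => t.1 == k), a.1 = k := by
      intro a ha
      simpa using List.mem_takeWhile_imp (l := rest) (p := fun t => t.1 == k) ha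
    have hrest : rest = rest.takeWhile (fun t => t.1 == k) ++ rest.dropWhile (fun t => t.1 == k) :=
      (List.takeWhile_append_dropWhile (p := fun t => t.1 == k) (l := rest)).symm
    have hpr : (rest.dropWhile (fun t => t.1 == k)).Pairwise (fun a b => a.1 ≤ b.1) :=
      (List.pairwise_cons.mp h).2.sublist (List.dropWhile_sublist _)
    simp only [groupAdj, List.map_cons, List.mem_cons]
    rw [ih hpr c]
    constructor
    · rintro (rfl | hc)
      · exact Or.inl rfl
      · right
        exact (List.Sublist.map (fun p : String × β => p.1) (List.dropWhile_sublist (p := fun t => t.1 == k) (l := rest))).mem hc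
    · rintro (rfl | hc)
      · exact Or.inl rfl
      · rw [hrest, List.map_append] at hc
        rcases List.mem_append.mp hc with hc | hc
        · left
          rcases List.mem_map.mp hc with ⟨a, ha, rfl⟩
          exact hsame a ha
        · exact Or.inr hc

lemma keys_groupAdj_pairwise {β : Type} :
    ∀ (l : List (String × β)), l.Pairwise (fun a b => a.1 ≤ b.1) →
    ((groupAdj l).map (fun p => p.1)).Pairwise (fun a b => a < b) := by
  intro l
  induction l using groupAdj.induct with
  | case1 => simp [groupAdj]
  | case2 k pg rest restr ih =>
    intro h
    have hpr : (rest.dropWhile (fun t => t.1 == k)).Pairwise (fun a b => a.1 ≤ b.1) :=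
      (List.pairwise_cons.mp h).2.sublist (List.dropWhile_sublist _)
    simp only [groupAdj, List.map_cons]
    refine List.pairwise_cons.mpr ⟨?_, ih hpr⟩
    intro c hc
    rcases List.mem_map.mp ((mem_keys_groupAdj _ hpr c).mp hc) with ⟨a, ha, rfl⟩
    exact restr_gt k pg rest h a ha

lemma groupAdj_eq {β : Type} :
    ∀ (l : List (String × β)), l.Pairwise (fun a b => a.1 ≤ b.1) →
    groupAdj l = ((groupAdj l).map (fun p => p.1)).map
      (fun c => (c, (l.filter (fun p => p.1 == c)).map (fun p => p.2))) := by
  intro l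
  induction l using groupAdj.induct with
  | case1 => simp [groupAdj]
  | case2 k pg rest restr ih =>
    intro h
    have hsame : ∀ a ∈ rest.takeWhile (fun t => t.1 == k), a.1 = k := by
      intro a ha
      simpa using List.mem_takeWhile_imp (l := rest) (p := fun t => t.1 == k) ha
    have hrest : rest = rest.takeWhile (fun t => t.1 == k) ++ rest.dropWhile (fun t => t.1 == k) :=
      (List.takeWhile_append_dropWhile (p := fun t => t.1 == k) (l := rest)).symm
    have hpr : (rest.dropWhile (fun t => t.1 == k)).Pairwise (fun a b => a.1 ≤ b.1) :=
      (List.pairwise_cons.mp h).2.sublist (List.dropWhile_sublist _)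
    have hgt := restr_gt k pg rest h
    simp only [groupAdj, List.map_cons]
    congr 1
    · -- head entry
      have hfk : ((k, pg) :: rest).filter (fun p => p.1 == k) = (k, pg) :: rest.takeWhile (fun t => t.1 == k) := by
        rw [List.filter_cons_of_pos (by simp)]
        congr 1
        conv_lhs => rw [hrest]
        rw [List.filter_append]
        rw [List.filter_eq_self.mpr (by intro a ha; simpa using hsame a ha)]
        rw [List.filter_eq_nil_iff.mpr (by intro a ha; have := hgt a ha; simp [ne_of_gt this])]
        simp
      rw [hfk]
      simp
    · -- tail entries
      conv_lhs => rw [ih hpr]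
      apply List.map_congr_left
      intro c hc
      rcases List.mem_map.mp ((mem_keys_groupAdj _ hpr c).mp hc) with ⟨a, ha, hac⟩
      have hck : k < c := hac ▸ hgt a ha
      have : ((k, pg) :: rest).filter (fun p => p.1 == c) = (rest.dropWhile (fun t => t.1 == k)).filter (fun p => p.1 == c) := by
        rw [List.filter_cons_of_neg (by simp [ne_of_lt hck])]
        conv_lhs => rw [hrest]
        rw [List.filter_append]
        rw [List.filter_eq_nil_iff.mpr (by intro a' ha'; have := hsame a' ha'; simp [this, ne_of_lt hck])]
        simp
      rw [this]


-- final assembly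
theorem ab_eq (pages : List (List (String × String))) :
    group_pages_by_section pages = group_pages_by_section_alt pages := by
  simp only [group_pages_by_section, group_pages_by_section_alt]
  rw [foldA_eq pages PySem.Dict.empty, foldB_eq pages []]
  simp only [List.nil_append]
  set xs := keyedOf pages with hxs
  set d := xs.foldl (fun d p => d.modify p.1 [] (fun v => v ++ [p.2])) PySem.Dict.empty with hd
  set ss := PySem.List.sorted xs (fun t => t.1) with hss
  have hnd : d.keys.Nodup := by
    rw [hd]
    exact PySem.Dict.nodup_keys_foldl_modify_key xs (fun p => p.1) []
      (fun _ p v => v ++ [p.2]) PySem.Dict.empty PySem.Dict.nodup_keys_empty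
  have hitems : d.items = d.keys.map (fun k => (k, d.getD k [])) :=
    PySem.Dict.items_eq_map_keys d hnd []
  have hgetD : ∀ c, d.getD c [] = (xs.filter (fun p => p.1 == c)).map (fun p => p.2) := by
    intro c
    rw [hd, PySem.Dict.getD_foldl_modify_append]
    simp
  have hssp : ss.Pairwise (fun a b => a.1 ≤ b.1) := PySem.List.sorted_pairwise xs (fun t => t.1)
  have hB : groupAdj ss = ((groupAdj ss).map (fun p => p.1)).map
      (fun c => (c, (xs.filter (fun p => p.1 == c)).map (fun p => p.2))) := by
    conv_lhs => rw [groupAdj_eq ss hssp]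
    apply List.map_congr_left
    intro c _
    rw [hss, sorted_filter_stable]
  have hKb_lt : ((groupAdj ss).map (fun p => p.1)).Pairwise (fun a b => a < b) :=
    keys_groupAdj_pairwise ss hssp
  have hKb_nodup : ((groupAdj ss).map (fun p => p.1)).Nodup := hKb_lt.imp ne_of_lt
  have hkeys : d.keys = PySem.List.dedup (xs.map (fun p => p.1)) := by
    rw [hd, PySem.Dict.keys_foldl_modify_key]
    simp [PySem.List.dedup, PySem.Set.update, PySem.Set.ofList]
  have hmem : ∀ c, c ∈ (groupAdj ss).map (fun p => p.1) ↔ c ∈ d.keys := by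
    intro c
    rw [mem_keys_groupAdj ss hssp c, hkeys, PySem.List.mem_dedup]
    constructor <;> intro hc <;> rcases List.mem_map.mp hc with ⟨a, ha, rfl⟩
    · exact List.mem_map.mpr ⟨a, (PySem.List.mem_sorted xs (fun t => t.1) false a).mp ha, rfl⟩
    · exact List.mem_map.mpr ⟨a, (PySem.List.mem_sorted xs (fun t => t.1) false a).mpr ha, rfl⟩
  have hperm : ((groupAdj ss).map (fun p => p.1)).Perm d.keys :=
    (List.perm_ext_iff_of_nodup hKb_nodup hnd).mpr hmem
  rw [hitems, List.map_congr_left (fun c _ => by rw [hgetD c]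
    : ∀ c ∈ d.keys, (c, d.getD c []) = (c, (xs.filter (fun p => p.1 == c)).map (fun p => p.2)))]
  refine PySem.List.sorted_eq_of_perm_of_pairwise_lt _ (groupAdj ss) (fun p : String × List (List (String × String)) => p.1) ?_ ?_
  · rw [hB]
    exact hperm.map _
  · rw [hB]
    exact List.pairwise_map.mpr (by simpa using hKb_lt)

-- ===== VERDICT (by name: the statement is the Claim_ definition above) =====
theorem group_pages_by_section_spec : Claim_equal_group_pages_by_section := by
  intro pages _
  unfold Spec_group_pages_by_section
  exact ab_eq pages
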